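-- pv_equiv track=rewrite | github.com/wakkawarpman-oss/hanna-v3-2-clean | src/tui/app.py | _parse_command_options
-- ===== SOURCE A (Python) =====
-- def _parse_command_options(tokens: list[str]) -> dict[str, str]:
--     options: dict[str, str] = {}
--     current: str | None = None
--     for token in tokens:
--         if token.startswith("--"):
--             current = token
--             options[current] = ""
--             continue
--         if current is not None:
--             options[current] = token
--             current = None
--     return options
-- ===== SOURCE B (Python) =====
-- def _parse_command_options(tokens: list[str]) -> dict[str, str]:
--     options: dict[str, str] = {}
--     i = 0
--     n = len(tokens)
--     while i < n:
--         t = tokens[i]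
--         if t.startswith("--"):
--             if i + 1 < n:
--                 nxt = tokens[i + 1]
--                 if nxt.startswith("--"):
--                     options[t] = ""
--                     i += 1
--                 else:
--                     options[t] = nxt
--                     i += 2
--             else:
--                 options[t] = ""
--                 i += 1
--         else:
--             i += 1
--     return options
-- ===== Notes on version B (the rewrite author's own statement) =====
-- stated objective: alternative
-- what changed: Replaced the carried 'current' state variable across iterations by an index-based while-loop with one-token lookahead: at a flag it peeks at the next token to decide between value and empty default, advancing by 1 or 2.
import Mathlib
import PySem

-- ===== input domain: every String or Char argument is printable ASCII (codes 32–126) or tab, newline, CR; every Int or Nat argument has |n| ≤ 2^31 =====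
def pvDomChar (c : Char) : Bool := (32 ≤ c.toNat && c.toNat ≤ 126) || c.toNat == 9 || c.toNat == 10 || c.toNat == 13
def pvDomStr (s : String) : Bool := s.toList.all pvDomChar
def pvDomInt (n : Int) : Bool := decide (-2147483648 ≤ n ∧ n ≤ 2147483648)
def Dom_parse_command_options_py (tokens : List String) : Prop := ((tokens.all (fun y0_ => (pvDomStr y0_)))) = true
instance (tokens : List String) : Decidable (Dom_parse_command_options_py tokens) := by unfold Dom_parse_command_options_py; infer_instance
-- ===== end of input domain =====

-- B replaces A's carried `current` state by an index-based loop with one-token lookahead; same cost, different decomposition.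

-- ===== PORT A =====
-- the body of A's for-loop, on state (options, current)
def pvAStep (st : PySem.Dict String String × Option String) (token : String) :
    PySem.Dict String String × Option String :=
  if PySem.Str.startswith token "--" then (st.1.insert token "", some token)
  else
    match st.2 with
    | some c => (st.1.insert c token, none)
    | none => st

def parse_command_options_py (tokens : List String) : List (String × String) :=
  (tokens.foldl pvAStep (PySem.Dict.empty, none)).1.items

-- ===== PORT B =====
-- Source B's while-loop: index i, lookahead at tokens[i+1]
def pvBLoop (tokens : List String) (options : PySem.Dict String String) (i : Nat) :
    PySem.Dict String String :=
  if h : i < tokens.length then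
    let t := tokens[i]
    if PySem.Str.startswith t "--" then
      if h2 : i + 1 < tokens.length then
        let nxt := tokens[i + 1]
        if PySem.Str.startswith nxt "--" then pvBLoop tokens (options.insert t "") (i + 1)
        else pvBLoop tokens (options.insert t nxt) (i + 2)
      else pvBLoop tokens (options.insert t "") (i + 1)
    else pvBLoop tokens options (i + 1)
  else options
termination_by tokens.length - i

def parse_command_options_py_alt (tokens : List String) : List (String × String) :=
  (pvBLoop tokens PySem.Dict.empty 0).items

-- ===== PRECONDITION & SPEC =====
def Spec_parse_command_options_py (tokens : List String) (out : List (String × String)) : Prop := out = parse_command_options_py_alt tokens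
instance (tokens : List String) (out : List (String × String)) : Decidable (Spec_parse_command_options_py tokens out) := by unfold Spec_parse_command_options_py; infer_instance

-- ===== CLAIM (what is proved, stated in full; the proofs are below) =====
def Claim_equal_parse_command_options_py : Prop := ∀ (tokens : List String), Dom_parse_command_options_py tokens → Spec_parse_command_options_py tokens (parse_command_options_py tokens)

-- ===== LEMMAS AND PROOFS =====

-- B's loop from index i computes the same dict as A's fold over the remaining suffix with no pending flag
lemma pvBLoop_eq_foldl (n : Nat) : ∀ (tokens : List String) (i : Nat), tokens.length - i ≤ n →
    ∀ (opts : PySem.Dict String String),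
      pvBLoop tokens opts i = ((tokens.drop i).foldl pvAStep (opts, none)).1 := by
  induction n with
  | zero =>
    intro tokens i hle opts
    have hge : tokens.length ≤ i := by omega
    rw [pvBLoop]
    simp [List.drop_eq_nil_of_le hge, Nat.not_lt.mpr hge]
  | succ n ih =>
    intro tokens i hle opts
    by_cases h : i < tokens.length
    · have hdrop : tokens.drop i = tokens[i] :: tokens.drop (i + 1) :=
        List.drop_eq_getElem_cons h
      rw [pvBLoop]
      simp only [h, dif_pos]
      by_cases hf : PySem.Str.startswith tokens[i] "--"
      <;> have hf' := hf <;> simp only [PySem.Str.startswith_eq, show ("--".toList = ['-', '-']) from rfl] at hf'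
      · simp only [hf, if_pos]
        by_cases h2 : i + 1 < tokens.length
        · have hdrop2 : tokens.drop (i + 1) = tokens[i + 1] :: tokens.drop (i + 2) :=
            List.drop_eq_getElem_cons h2
          simp only [h2, dif_pos]
          by_cases hg : PySem.Str.startswith tokens[i + 1] "--"
          <;> have hg' := hg <;> simp only [PySem.Str.startswith_eq, show ("--".toList = ['-', '-']) from rfl] at hg'
          · simp only [hg, if_pos]
            rw [ih tokens (i + 1) (by omega) (opts.insert tokens[i] "")]
            rw [hdrop, hdrop2, List.foldl_cons, List.foldl_cons, List.foldl_cons]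
            simp [pvAStep, hf', hg']
          · simp only [hg]
            rw [ih tokens (i + 2) (by omega) (opts.insert tokens[i] tokens[i + 1])]
            rw [hdrop, hdrop2, List.foldl_cons, List.foldl_cons]
            simp [pvAStep, hf', hg', PySem.Dict.insert_insert_self]
        · have hnil : tokens.drop (i + 1) = [] :=
            List.drop_eq_nil_of_le (by omega)
          simp only [h2]
          rw [ih tokens (i + 1) (by omega) (opts.insert tokens[i] "")]
          rw [hdrop, hnil, List.foldl_cons]
          simp [pvAStep, hf']
      · simp only [hf]
        rw [ih tokens (i + 1) (by omega) opts]
        rw [hdrop, List.foldl_cons]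
        simp [pvAStep, hf']
    · rw [pvBLoop]
      have hge : tokens.length ≤ i := by omega
      simp [List.drop_eq_nil_of_le hge, h]

-- ===== VERDICT (by name: the statement is the Claim_ definition above) =====
theorem parse_command_options_py_spec : Claim_equal_parse_command_options_py := by
  intro tokens _
  unfold Spec_parse_command_options_py parse_command_options_py parse_command_options_py_alt
  rw [pvBLoop_eq_foldl tokens.length tokens 0 (by omega) PySem.Dict.empty]
  simp
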